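-- pv_equiv track=rewrite | github.com/Shellbye/leetcode-python | 434.py | countSegments
-- ===== SOURCE A (Python) =====
-- def countSegments(s):
--     """
--     :type s: str
--     :rtype: int
--     """
--     preIsBlank = True
--     ans = 0
--     for v in s:
--         if v == " " and preIsBlank:
--             continue
--         elif v != " " and preIsBlank:
--             ans = ans + 1
--             preIsBlank = False
--         elif v == " " and not preIsBlank:
--             preIsBlank = True
--         else:
--             pass
--     return ans
-- ===== SOURCE B (Python) =====
-- def countSegments(s):
--     return len([w for w in s.split(' ') if w])
-- ===== Notes on version B (the rewrite author's own statement) =====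
-- stated objective: idiomatic
-- what changed: B replaces A's char-by-char blank/non-blank state machine with a split-on-space then count-nonempty-tokens pipeline.
import Mathlib
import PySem

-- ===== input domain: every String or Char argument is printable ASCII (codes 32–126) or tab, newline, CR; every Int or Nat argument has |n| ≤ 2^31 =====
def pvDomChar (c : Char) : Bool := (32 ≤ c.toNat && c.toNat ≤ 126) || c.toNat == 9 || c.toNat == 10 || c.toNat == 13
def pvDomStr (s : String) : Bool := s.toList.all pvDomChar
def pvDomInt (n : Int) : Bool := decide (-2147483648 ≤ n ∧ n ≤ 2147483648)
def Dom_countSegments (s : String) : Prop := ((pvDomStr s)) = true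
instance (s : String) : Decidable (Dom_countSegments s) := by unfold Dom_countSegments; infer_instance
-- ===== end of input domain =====

-- B is the idiomatic split-on-space-and-count-nonempty version of A's state machine; both are O(n).

-- ===== PORT A =====
-- literal port of A's loop: state (preIsBlank, ans), branches in A's order
def countSegments (s : String) : Int :=
  (s.toList.foldl
    (fun st v =>
      if v == ' ' && st.1 then st
      else if !(v == ' ') && st.1 then (false, st.2 + 1)
      else if v == ' ' && !st.1 then (true, st.2)
      else st)
    (true, (0 : Int))).2

-- ===== PORT B =====
-- port of Source B: len([w for w in s.split(' ') if w])
def countSegments_alt (s : String) : Int :=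
  (((PySem.Chars.splitOn s.toList [' ']).filter (fun w => !w.isEmpty)).length : Int)

-- ===== PRECONDITION & SPEC =====
def Spec_countSegments (s : String) (out : Int) : Prop := out = countSegments_alt s
instance (s : String) (out : Int) : Decidable (Spec_countSegments s out) := by unfold Spec_countSegments; infer_instance

-- ===== CLAIM (what is proved, stated in full; the proofs are below) =====
def Claim_equal_countSegments : Prop := ∀ (s : String), Dom_countSegments s → Spec_countSegments s (countSegments s)

-- ===== LEMMAS AND PROOFS =====

-- clean structural version of splitting on a single space
def pvTokens : List Char → List Char → List (List Char)
  | [], cur => [cur.reverse]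
  | c :: rest, cur => if c == ' ' then cur.reverse :: pvTokens rest [] else pvTokens rest (c :: cur)

lemma pvSplitOn_go_eq (l : List Char) : ∀ (fuel : Nat) (cur : List Char) (acc : List (List Char)),
    l.length ≤ fuel →
    PySem.Chars.splitOn.go [' '] fuel l cur acc = acc.reverse ++ pvTokens l cur := by
  induction l with
  | nil =>
    intro fuel cur acc _
    cases fuel <;> simp [PySem.Chars.splitOn.go, pvTokens]
  | cons c rest ih =>
    intro fuel cur acc h
    cases fuel with
    | zero => simp at h
    | succ fuel' =>
      simp only [List.length_cons, Nat.succ_le_succ_iff] at h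
      by_cases hc : c = ' '
      · subst hc
        rw [show PySem.Chars.splitOn.go [' '] (fuel' + 1) (' ' :: rest) cur acc
              = PySem.Chars.splitOn.go [' '] fuel' rest [] (cur.reverse :: acc) by
            simp [PySem.Chars.splitOn.go, List.isPrefixOf]]
        rw [ih fuel' [] (cur.reverse :: acc) h]
        simp [pvTokens]
      · rw [show PySem.Chars.splitOn.go [' '] (fuel' + 1) (c :: rest) cur acc
              = PySem.Chars.splitOn.go [' '] fuel' rest (c :: cur) acc by
            simp [PySem.Chars.splitOn.go, List.isPrefixOf, Ne.symm hc]]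
        rw [ih fuel' (c :: cur) acc h]
        simp [pvTokens, hc]

lemma pvSplitOn_eq (l : List Char) :
    PySem.Chars.splitOn l [' '] = pvTokens l [] := by
  unfold PySem.Chars.splitOn
  rw [pvSplitOn_go_eq l (l.length + 1) [] [] (by omega)]
  simp

def pvCnt (xs : List (List Char)) : Int := ((xs.filter (fun w => !w.isEmpty)).length : Int)

def pvStep : Bool × Int → Char → Bool × Int :=
  fun st v =>
    if v == ' ' && st.1 then st
    else if !(v == ' ') && st.1 then (false, st.2 + 1)
    else if v == ' ' && !st.1 then (true, st.2)
    else st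

lemma pvFold_eq (l : List Char) :
    (∀ ans : Int, (l.foldl pvStep (true, ans)).2 = ans + pvCnt (pvTokens l [])) ∧
    (∀ (ans : Int) (cur : List Char), cur ≠ [] →
      (l.foldl pvStep (false, ans)).2 = ans + pvCnt (pvTokens l cur) - 1) := by
  induction l with
  | nil =>
    constructor
    · intro ans; simp [pvTokens, pvCnt]
    · intro ans cur hcur
      simp [pvTokens, pvCnt, hcur]
  | cons c rest ih =>
    obtain ⟨ih1, ih2⟩ := ih
    constructor
    · intro ans
      by_cases hc : c = ' '
      · subst hc
        simp only [List.foldl_cons, pvStep, beq_self_eq_true, Bool.true_and, if_true]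
        rw [ih1 ans]
        simp [pvTokens, pvCnt]
      · have : pvStep (true, ans) c = (false, ans + 1) := by
          simp [pvStep, hc]
        simp only [List.foldl_cons, this]
        rw [(ih2 (ans + 1) [c] (by simp))]
        simp [pvTokens, hc]
        ring
    · intro ans cur hcur
      by_cases hc : c = ' '
      · subst hc
        have : pvStep (false, ans) ' ' = (true, ans) := by simp [pvStep]
        simp only [List.foldl_cons, this]
        rw [ih1 ans]
        simp [pvTokens, pvCnt, hcur]
        ring
      · have : pvStep (false, ans) c = (false, ans) := by simp [pvStep, hc]
        simp only [List.foldl_cons, this]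
        rw [ih2 ans (c :: cur) (by simp)]
        simp [pvTokens, hc]

-- ===== VERDICT (by name: the statement is the Claim_ definition above) =====
theorem countSegments_spec : Claim_equal_countSegments := by
  intro s _
  unfold Spec_countSegments countSegments countSegments_alt
  rw [pvSplitOn_eq]
  have hstep : (fun (st : Bool × Int) (v : Char) =>
      if v == ' ' && st.1 then st
      else if !(v == ' ') && st.1 then (false, st.2 + 1)
      else if v == ' ' && !st.1 then (true, st.2)
      else st) = pvStep := rfl
  rw [hstep]
  have := (pvFold_eq s.toList).1 0
  simpa [pvCnt] using this
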